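-- pv_equiv track=rewrite | github.com/agam-lang/agam | benchmarks/benchmarks/02_numerical_computation/comparisons/polynomial_eval.py | polynomial_cost
-- ===== SOURCE A (Python) =====
-- def polynomial_cost(points: int, degree: int) -> int:
--     checksum = 0
--     for point in range(points):
--         x = (point % 97) + 3
--         value = 1
--         for coeff in range(degree, 0, -1):
--             value = ((value * x) + ((coeff * 11) + (point % 29))) % 1_000_003
--         checksum += value
--     return checksum
-- ===== SOURCE B (Python) =====
-- def polynomial_cost(points: int, degree: int) -> int:
--     # The per-point value depends only on point % 97 and point % 29, hence
--     # only on point % 2813 (lcm(97, 29)); compute one cycle and scale.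
--     if points <= 0:
--         return 0
--     PERIOD = 2813
--     m = min(points, PERIOD)
--     cycle = []
--     for p in range(m):
--         x = (p % 97) + 3
--         value = 1
--         for coeff in range(degree, 0, -1):
--             value = (value * x + coeff * 11 + (p % 29)) % 1_000_003
--         cycle.append(value)
--     if points <= PERIOD:
--         return sum(cycle)
--     q, r = divmod(points, PERIOD)
--     return q * sum(cycle) + sum(cycle[:r])
-- ===== Notes on version B (the rewrite author's own statement) =====
-- stated objective: alternative
-- what changed: B exploits that the per-point value depends on the point only through point % 97 and point % 29, i.e. through point % 2813 (= lcm 97 29): it evaluates one 2813-point cycle of Horner values and combines full cycles by multiplication plus a remainder prefix sum, so the outer loop runs min(points, 2813) times instead of points times (the inner Horner loop over degree is unchanged, so cost in degree is the same).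
import Mathlib
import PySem

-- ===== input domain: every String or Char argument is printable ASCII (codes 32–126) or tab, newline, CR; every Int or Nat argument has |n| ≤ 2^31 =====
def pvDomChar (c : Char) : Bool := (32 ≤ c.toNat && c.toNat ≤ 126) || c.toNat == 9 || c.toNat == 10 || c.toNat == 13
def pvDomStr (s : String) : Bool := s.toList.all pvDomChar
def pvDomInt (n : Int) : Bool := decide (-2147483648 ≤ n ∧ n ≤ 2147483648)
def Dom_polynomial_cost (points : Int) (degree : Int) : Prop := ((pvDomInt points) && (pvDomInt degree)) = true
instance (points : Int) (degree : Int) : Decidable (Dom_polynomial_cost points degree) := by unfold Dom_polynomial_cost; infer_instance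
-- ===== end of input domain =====

-- B exploits that the per-point value depends on the point only through point % 97 and
-- point % 29, i.e. through point % 2813 (= lcm 97 29): it evaluates one cycle and scales.

-- ===== PORT A =====
def polynomial_cost (points : Int) (degree : Int) : Int :=
  (PySem.List.pyRange 0 points 1).foldl
    (fun checksum point =>
      let x := PySem.Int.mod point 97 + 3
      let value := (PySem.List.pyRange degree 0 (-1)).foldl
        (fun value coeff =>
          PySem.Int.mod ((value * x) + ((coeff * 11) + PySem.Int.mod point 29)) 1000003) 1
      checksum + value)
    0

-- ===== PORT B =====
-- helper of B: the Horner value of one point (Source B's inner loop body)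
def pvPointValue (degree : Int) (p : Int) : Int :=
  let x := PySem.Int.mod p 97 + 3
  (PySem.List.pyRange degree 0 (-1)).foldl
    (fun value coeff =>
      PySem.Int.mod ((value * x) + ((coeff * 11) + PySem.Int.mod p 29)) 1000003) 1

def polynomial_cost_alt (points : Int) (degree : Int) : Int :=
  if points ≤ 0 then 0
  else
    let m := min points 2813
    let cycle := (PySem.List.pyRange 0 m 1).map (pvPointValue degree)
    if points ≤ 2813 then cycle.sum
    else
      let q := PySem.Int.floordiv points 2813
      let r := PySem.Int.mod points 2813
      q * cycle.sum + (PySem.List.slice cycle none (some r)).sum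

-- ===== PRECONDITION & SPEC =====
def Spec_polynomial_cost (points : Int) (degree : Int) (out : Int) : Prop := out = polynomial_cost_alt points degree
instance (points : Int) (degree : Int) (out : Int) : Decidable (Spec_polynomial_cost points degree out) := by unfold Spec_polynomial_cost; infer_instance

-- ===== CLAIM (what is proved, stated in full; the proofs are below) =====
def Claim_equal_polynomial_cost : Prop := ∀ (points : Int) (degree : Int), Dom_polynomial_cost points degree → Spec_polynomial_cost points degree (polynomial_cost points degree)

-- ===== LEMMAS AND PROOFS =====

-- the per-point value as a function of the Nat loop index
def pvG (degree : Int) (k : Nat) : Int := pvPointValue degree (k : Int)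

-- A is the plain sum of per-point values
lemma pvA_eq_sum (points degree : Int) :
    polynomial_cost points degree
      = ((PySem.List.pyRange 0 points 1).map (pvPointValue degree)).sum := by
  have := PySem.List.foldl_add (l := PySem.List.pyRange 0 points 1)
    (g := pvPointValue degree) (a := (0 : Int))
  simpa [polynomial_cost, pvPointValue] using this

-- pvPointValue depends on p only through p % 97 and p % 29
lemma pvPointValue_congr (degree p q : Int)
    (h97 : PySem.Int.mod p 97 = PySem.Int.mod q 97)
    (h29 : PySem.Int.mod p 29 = PySem.Int.mod q 29) :
    pvPointValue degree p = pvPointValue degree q := by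
  simp only [pvPointValue, h97, h29]

-- periodicity of the per-point value with period 2813 = 97 * 29
lemma pvG_period (degree : Int) (k : Nat) : pvG degree k = pvG degree (k % 2813) := by
  unfold pvG
  apply pvPointValue_congr
  · simp only [PySem.Int.mod_eq_emod_of_pos (by norm_num : (0:Int) < 97)]
    omega
  · simp only [PySem.Int.mod_eq_emod_of_pos (by norm_num : (0:Int) < 29)]
    omega

-- sum of a 2813-periodic function over range n: full cycles plus a remainder prefix
lemma pv_sum_range_period (G : Nat → Int) (hper : ∀ k, G k = G (k % 2813)) (n : Nat) :
    ((List.range n).map G).sum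
      = (n / 2813 : Nat) * ((List.range 2813).map G).sum
        + ((List.range (n % 2813)).map G).sum := by
  induction n with
  | zero => simp
  | succ n ih =>
    rw [List.range_succ, List.map_append, List.sum_append, ih]
    simp only [List.map_cons, List.map_nil, List.sum_cons, List.sum_nil, add_zero]
    rw [hper n]
    by_cases h : n % 2813 = 2812
    · have hdiv : (n + 1) / 2813 = n / 2813 + 1 := by omega
      have hmod : (n + 1) % 2813 = 0 := by omega
      have hC : (List.map G (List.range 2813)).sum
          = (List.map G (List.range 2812)).sum + G 2812 := by
        rw [show List.range 2813 = List.range 2812 ++ [2812] from List.range_succ,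
          List.map_append, List.sum_append]
        simp only [List.map_cons, List.map_nil, List.sum_cons, List.sum_nil, add_zero]
      rw [hdiv, hmod, h, add_assoc, ← hC]
      simp only [List.range_zero, List.map_nil, List.sum_nil, add_zero]
      push_cast
      ring
    · have hdiv : (n + 1) / 2813 = n / 2813 := by omega
      have hmod : (n + 1) % 2813 = n % 2813 + 1 := by omega
      rw [hdiv, hmod,
        show List.range (n % 2813 + 1) = List.range (n % 2813) ++ [n % 2813] from
          List.range_succ,
        List.map_append, List.sum_append]
      simp only [List.map_cons, List.map_nil, List.sum_cons, List.sum_nil, add_zero]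
      ring

-- the sum over range(0, b, 1) of pvPointValue is the Nat-indexed sum of pvG
lemma pv_pyRange_sum (degree : Int) (b : Int) :
    ((PySem.List.pyRange 0 b 1).map (pvPointValue degree)).sum
      = ((List.range b.toNat).map (pvG degree)).sum := by
  rw [PySem.List.pyRange_one, List.map_map]
  simp only [sub_zero]
  congr 1
  apply List.map_congr_left
  intro k hk
  simp [pvG]

-- prefix of the cycle list summed = Nat-indexed partial sum
lemma pv_take_sum (degree : Int) (m : Nat) (hm : m ≤ 2813) :
    (((PySem.List.pyRange 0 2813 1).map (pvPointValue degree)).take m).sum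
      = ((List.range m).map (pvG degree)).sum := by
  rw [PySem.List.pyRange_one, List.map_map, ← List.map_take, List.take_range]
  have hmin : min m ((2813 : Int) - 0).toNat = m := by norm_num; omega
  rw [hmin]
  apply congrArg
  apply List.map_congr_left
  intro k hk
  simp [pvG]

-- ===== VERDICT (by name: the statement is the Claim_ definition above) =====
theorem polynomial_cost_spec : Claim_equal_polynomial_cost := by
  intro points degree _
  show polynomial_cost points degree = polynomial_cost_alt points degree
  rw [pvA_eq_sum]
  unfold polynomial_cost_alt
  by_cases h0 : points ≤ 0
  · simp [h0, PySem.List.pyRange_one_eq_nil h0]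
  · simp only [h0, if_false]
    by_cases h1 : points ≤ 2813
    · have hm : min points 2813 = points := min_eq_left h1
      rw [hm, if_pos h1]
    · -- points > 2813
      have hm : min points 2813 = 2813 := min_eq_right (not_le.mp h1).le
      rw [hm, if_neg h1]
      have hq : PySem.Int.floordiv points 2813 = ((points.toNat / 2813 : Nat) : Int) := by
        rw [PySem.Int.floordiv_eq_ediv_of_pos (by norm_num : (0:Int) < 2813)]
        omega
      have hr : PySem.Int.mod points 2813 = ((points.toNat % 2813 : Nat) : Int) := by
        rw [PySem.Int.mod_eq_emod_of_pos (by norm_num : (0:Int) < 2813)]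
        omega
      rw [hq, hr, PySem.List.slice_to_natCast, pv_pyRange_sum degree points,
        pv_pyRange_sum degree 2813,
        pv_sum_range_period (pvG degree) (pvG_period degree) points.toNat,
        pv_take_sum degree (points.toNat % 2813) (by omega),
        show ((2813 : Int)).toNat = 2813 from rfl]
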